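-- pv_equiv track=rewrite | github.com/akobyansamvel/psyweb | backend/api/psy_toolkit_service.py | _determine_difficulty
-- ===== SOURCE A (Python) =====
-- from typing import Dict, List, Optional, Any
--
-- def _determine_difficulty(test_data: Dict) -> str:
--     """Определяет уровень сложности теста"""
--     metadata = test_data.get('metadata', {})
--     tags = metadata.get('tags', [])
--
--     if any(tag.lower() in ['expert', 'advanced', 'professional'] for tag in tags):
--         return 'hard'
--     elif any(tag.lower() in ['beginner', 'simple', 'basic'] for tag in tags):
--         return 'easy'
--     else:
--         return 'medium'
-- ===== SOURCE B (Python) =====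
-- def _determine_difficulty(test_data):
--     """Определяет уровень сложности теста"""
--     tags = test_data.get('metadata', {}).get('tags', [])
--     found_easy = False
--     for tag in tags:
--         t = tag.lower()
--         if t in ('expert', 'advanced', 'professional'):
--             return 'hard'
--         if t in ('beginner', 'simple', 'basic'):
--             found_easy = True
--     return 'easy' if found_easy else 'medium'
-- ===== Notes on version B (the rewrite author's own statement) =====
-- stated objective: alternative
-- what changed: Replaces A's two independent any(...) scans (each lowercasing every tag) with a single pass that lowercases each tag once, returns 'hard' on the first hard tag, and remembers an easy flag for the final verdict.
import Mathlib
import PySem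

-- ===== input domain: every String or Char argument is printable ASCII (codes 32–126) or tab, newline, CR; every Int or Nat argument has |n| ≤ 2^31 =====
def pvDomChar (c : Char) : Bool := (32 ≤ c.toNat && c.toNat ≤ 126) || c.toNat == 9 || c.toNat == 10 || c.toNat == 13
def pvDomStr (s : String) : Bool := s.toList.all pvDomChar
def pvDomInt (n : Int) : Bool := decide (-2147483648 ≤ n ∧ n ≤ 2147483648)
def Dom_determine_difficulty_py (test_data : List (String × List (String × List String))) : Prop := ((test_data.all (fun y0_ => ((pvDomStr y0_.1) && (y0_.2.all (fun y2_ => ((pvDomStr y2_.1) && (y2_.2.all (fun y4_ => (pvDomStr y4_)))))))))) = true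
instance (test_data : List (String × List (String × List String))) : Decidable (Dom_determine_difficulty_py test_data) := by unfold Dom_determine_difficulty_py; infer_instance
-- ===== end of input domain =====

-- B replaces A's two independent any(...) scans with one pass over tags that lowercases each
-- tag once, returns 'hard' at the first hard tag and keeps an easy flag (alternative decomposition).

-- ===== PORT A =====
-- test_data.get('metadata', {}) / metadata.get('tags', []) : first-match association-list lookup with default
def determine_difficulty_py (test_data : List (String × List (String × List String))) : String :=
  let metadata := ((test_data.find? (fun kv => kv.1 == "metadata")).map (·.2)).getD []
  let tags := ((metadata.find? (fun kv => kv.1 == "tags")).map (·.2)).getD []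
  if tags.any (fun tag => (["expert", "advanced", "professional"] : List String).contains (PySem.Str.lower tag)) then
    "hard"
  else if tags.any (fun tag => (["beginner", "simple", "basic"] : List String).contains (PySem.Str.lower tag)) then
    "easy"
  else
    "medium"

-- ===== PORT B =====
def ddAltLoop : List String → Bool → String
  | [], foundEasy => if foundEasy then "easy" else "medium"
  | tag :: rest, foundEasy =>
    let t := PySem.Str.lower tag
    if t == "expert" || t == "advanced" || t == "professional" then "hard"
    else ddAltLoop rest (foundEasy || (t == "beginner" || t == "simple" || t == "basic"))

def determine_difficulty_py_alt (test_data : List (String × List (String × List String))) : String :=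
  let tags := ((((test_data.find? (fun kv => kv.1 == "metadata")).map (·.2)).getD []).find?
      (fun kv => kv.1 == "tags")).map (·.2) |>.getD []
  ddAltLoop tags false

-- ===== PRECONDITION & SPEC =====
def Spec_determine_difficulty_py (test_data : List (String × List (String × List String))) (out : String) : Prop := out = determine_difficulty_py_alt test_data
instance (test_data : List (String × List (String × List String))) (out : String) : Decidable (Spec_determine_difficulty_py test_data out) := by unfold Spec_determine_difficulty_py; infer_instance

-- ===== CLAIM (what is proved, stated in full; the proofs are below) =====
def Claim_equal_determine_difficulty_py : Prop := ∀ (test_data : List (String × List (String × List String))), Dom_determine_difficulty_py test_data → Spec_determine_difficulty_py test_data (determine_difficulty_py test_data)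

-- ===== LEMMAS AND PROOFS =====
def pvHardTag (t : String) : Bool :=
  PySem.Str.lower t == "expert" || PySem.Str.lower t == "advanced" || PySem.Str.lower t == "professional"

def pvEasyTag (t : String) : Bool :=
  PySem.Str.lower t == "beginner" || PySem.Str.lower t == "simple" || PySem.Str.lower t == "basic"

theorem pv_contains3 (l a b c : String) :
    ([a, b, c] : List String).contains l = (l == a || l == b || l == c) := by
  show (l == a || (l == b || (l == c || false))) = _
  cases l == a <;> cases l == b <;> cases l == c <;> rfl

theorem ddAltLoop_char (tags : List String) (found : Bool) :
    ddAltLoop tags found =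
      if tags.any pvHardTag then "hard"
      else if found || tags.any pvEasyTag then "easy"
      else "medium" := by
  induction tags generalizing found with
  | nil => cases found <;> simp [ddAltLoop]
  | cons tag rest ih =>
    show (if pvHardTag tag then "hard" else ddAltLoop rest (found || pvEasyTag tag)) = _
    by_cases h : pvHardTag tag
    · simp [List.any_cons, h]
    · rw [if_neg h, ih]
      simp [List.any_cons, h, Bool.or_assoc]

-- ===== VERDICT (by name: the statement is the Claim_ definition above) =====
theorem determine_difficulty_py_spec : Claim_equal_determine_difficulty_py := by
  intro test_data _
  unfold Spec_determine_difficulty_py determine_difficulty_py determine_difficulty_py_alt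
  rw [ddAltLoop_char]
  have hh : (fun tag => (["expert", "advanced", "professional"] : List String).contains (PySem.Str.lower tag)) = pvHardTag :=
    funext fun t => (pv_contains3 (PySem.Str.lower t) "expert" "advanced" "professional").trans rfl
  have he : (fun tag => (["beginner", "simple", "basic"] : List String).contains (PySem.Str.lower tag)) = pvEasyTag :=
    funext fun t => (pv_contains3 (PySem.Str.lower t) "beginner" "simple" "basic").trans rfl
  simp only [hh, he, Bool.false_or]
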